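-- pv_equiv track=rewrite | github.com/alan99/Practice | python/find_K1_DistinctStr.py | find_K1_DistinctStr
-- ===== SOURCE A (Python) =====
-- from collections import defaultdict
--
-- def find_K1_DistinctStr(str, K):
-- 	ans = []
-- 	if K <= 1 or K > len(str):
-- 		return ans
--
-- 	dictStr = defaultdict(int)
-- 	for c in str[:K]:
-- 		dictStr[c] += 1
--
-- 	if len(dictStr) == K-1:
-- 		ans.append(str[:K])
--
-- 	for i,c in enumerate(str[K:], K):
-- 		dictStr[str[i-K]] -= 1
-- 		dictStr[c] += 1
-- 		if dictStr[str[i-K]] == 0: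
-- 			del dictStr[str[i-K]]
--
-- 		if len(dictStr) == K-1:
-- 			ans.append(str[i-K+1:i+1])
--
-- 	return ans
-- ===== SOURCE B (Python) =====
-- def find_K1_DistinctStr(str, K):
--     ans = []
--     if K <= 1 or K > len(str):
--         return ans
--     for i in range(len(str) - K + 1):
--         w = str[i:i+K]
--         if len(set(w)) == K - 1:
--             ans.append(w)
--     return ans
-- ===== Notes on version B (the rewrite author's own statement) =====
-- stated objective: simpler
-- what changed: Replaced the incremental sliding-window character-count dict (with add/subtract/delete-on-zero bookkeeping) by a direct per-window recomputation: slice each K-length window and count its distinct characters with set().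
import Mathlib
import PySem

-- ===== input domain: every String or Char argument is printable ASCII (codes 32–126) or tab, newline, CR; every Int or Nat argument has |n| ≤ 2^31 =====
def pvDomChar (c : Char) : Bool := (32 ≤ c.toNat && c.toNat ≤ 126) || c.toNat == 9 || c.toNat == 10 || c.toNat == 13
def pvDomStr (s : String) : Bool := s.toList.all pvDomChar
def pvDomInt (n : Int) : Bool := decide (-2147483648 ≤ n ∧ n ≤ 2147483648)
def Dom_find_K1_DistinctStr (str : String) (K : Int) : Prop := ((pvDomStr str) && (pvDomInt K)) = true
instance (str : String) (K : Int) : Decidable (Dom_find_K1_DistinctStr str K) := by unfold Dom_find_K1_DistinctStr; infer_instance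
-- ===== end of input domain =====

-- B replaces A's incrementally-maintained sliding-window character-count dict by a per-window
-- recomputation of the distinct-character count (objective: simpler; not faster).


-- ===== PORT A =====
-- the three dict statements of A's loop body: decrement the leaving char, increment the
-- entering char, delete the leaving char's entry if its count reached 0
def pvUpd (d : PySem.Dict Char Int) (a c : Char) : PySem.Dict Char Int :=
  if ((d.modify a 0 (· - 1)).modify c 0 (· + 1)).getD a 0 = 0
  then ((d.modify a 0 (· - 1)).modify c 0 (· + 1)).erase a
  else (d.modify a 0 (· - 1)).modify c 0 (· + 1)

-- one iteration of A's `for i,c in enumerate(str[K:], K)` loop over state (dictStr, ans)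
def pvStepA (s : List Char) (K : Int) (st : PySem.Dict Char Int × List String)
    (ic : Int × Char) : PySem.Dict Char Int × List String :=
  let d3 := pvUpd st.1 (PySem.List.pyGetD s (ic.1 - K) ' ') ic.2
  (d3, if (d3.size : Int) = K - 1 then
          st.2 ++ [String.ofList (PySem.List.slice s (some (ic.1 - K + 1)) (some (ic.1 + 1)))]
        else st.2)

def find_K1_DistinctStr (str : String) (K : Int) : List String :=
  let s := str.toList
  if K ≤ 1 ∨ K > PySem.List.len s then []
  else
    let d0 := (PySem.List.slice s none (some K)).foldl
                (fun d c => d.modify c 0 (fun x => x + 1)) PySem.Dict.empty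
    let a0 : List String :=
      if (d0.size : Int) = K - 1 then [String.ofList (PySem.List.slice s none (some K))] else []
    ((PySem.List.enumerate (PySem.List.slice s (some K) none) K).foldl (pvStepA s K) (d0, a0)).2

-- ===== PORT B =====
def find_K1_DistinctStr_alt (str : String) (K : Int) : List String :=
  let s := str.toList
  if K ≤ 1 ∨ K > PySem.List.len s then []
  else
    (PySem.List.pyRange 0 (PySem.List.len s - K + 1) 1).foldl
      (fun ans i =>
        let w := PySem.List.slice s (some i) (some (i + K))
        if PySem.Set.len (PySem.Set.ofList w) = K - 1 then ans ++ [String.ofList w] else ans) []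

-- ===== PRECONDITION & SPEC =====
def Spec_find_K1_DistinctStr (str : String) (K : Int) (out : List String) : Prop := out = find_K1_DistinctStr_alt str K
instance (str : String) (K : Int) (out : List String) : Decidable (Spec_find_K1_DistinctStr str K out) := by unfold Spec_find_K1_DistinctStr; infer_instance

-- ===== CLAIM (what is proved, stated in full; the proofs are below) =====
def Claim_equal_find_K1_DistinctStr : Prop := ∀ (str : String) (K : Int), Dom_find_K1_DistinctStr str K → Spec_find_K1_DistinctStr str K (find_K1_DistinctStr str K)

-- ===== LEMMAS AND PROOFS =====

-- the K-window of s starting at j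
def pvWin (s : List Char) (k j : Nat) : List Char := (s.drop j).take k

-- B's per-window test and emitted string
def pvP (s : List Char) (K : Int) (k j : Nat) : Bool :=
  decide (PySem.Set.len (PySem.Set.ofList (pvWin s k j)) = K - 1)

def pvF (s : List Char) (k j : Nat) : String := String.ofList (pvWin s k j)

-- A's loop invariant: the dict is a (positive-count, unique-key) counter of the current window
def pvInv (d : PySem.Dict Char Int) (w : List Char) : Prop :=
  d.keys.Nodup ∧ (∀ c, d.getD c 0 = (w.count c : Int)) ∧ (∀ c, d.contains c = true ↔ c ∈ w)

lemma pvErase_get? {κ ν : Type} [BEq κ] [LawfulBEq κ] [DecidableEq κ] (d : PySem.Dict κ ν) (k x : κ) :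
    (d.erase k).get? x = if x = k then none else d.get? x := by
  obtain ⟨items⟩ := d
  induction items with
  | nil => simp [PySem.Dict.erase, PySem.Dict.get?]
  | cons p t ih =>
    by_cases h1 : p.1 = k <;> by_cases h2 : p.1 = x <;>
      simp_all [PySem.Dict.erase, PySem.Dict.get?]
  
lemma pvErase_getD {κ ν : Type} [BEq κ] [LawfulBEq κ] [DecidableEq κ] (d : PySem.Dict κ ν) (k x : κ) (v : ν) :
    (d.erase k).getD x v = if x = k then v else d.getD x v := by
  simp only [PySem.Dict.getD, pvErase_get?]
  split <;> rfl

lemma pvErase_contains {κ ν : Type} [BEq κ] [LawfulBEq κ] [DecidableEq κ] (d : PySem.Dict κ ν) (k x : κ) :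
    (d.erase k).contains x = true ↔ (x ≠ k ∧ d.contains x = true) := by
  rw [PySem.Dict.contains_eq_isSome_get?, PySem.Dict.contains_eq_isSome_get?, pvErase_get?]
  split <;> simp_all

lemma pvErase_keys {κ ν : Type} [BEq κ] (d : PySem.Dict κ ν) (k : κ) :
    (d.erase k).keys = d.keys.filter (fun x => !(x == k)) := by
  obtain ⟨items⟩ := d
  simp [PySem.Dict.erase, PySem.Dict.keys, List.filter_map]
  rfl

lemma pvInv_counter (w : List Char) : pvInv (PySem.Dict.counter w) w := by
  refine ⟨PySem.Dict.nodup_keys_counter w, fun c => PySem.Dict.getD_counter w c, fun c => ?_⟩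
  rw [PySem.Dict.contains_counter]
  simp

lemma pvInv_size {d : PySem.Dict Char Int} {w : List Char} (h : pvInv d w) :
    (d.size : Int) = PySem.Set.len (PySem.Set.ofList w) := by
  obtain ⟨hnd, -, hc⟩ := h
  have hperm : d.keys.Perm (PySem.Set.ofList w) := by
    rw [List.perm_ext_iff_of_nodup hnd (PySem.Set.nodup_ofList w)]
    intro a
    rw [PySem.Set.mem_ofList, ← hc a, PySem.Dict.contains_iff_mem_keys]
  have hlen : d.size = d.keys.length := by
    simp [PySem.Dict.size, PySem.Dict.keys]
  rw [hlen, PySem.Set.len, hperm.length_eq]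

lemma pvStep_inv {d : PySem.Dict Char Int} {a : Char} {m : List Char} (c : Char)
    (h : pvInv d (a :: m)) : pvInv (pvUpd d a c) (m ++ [c]) := by
  obtain ⟨hnd, hg, hc⟩ := h
  have hg2 : ∀ x, ((d.modify a 0 (· - 1)).modify c 0 (· + 1)).getD x 0 = (((m ++ [c]).count x : Nat) : Int) := by
    intro x
    rw [PySem.Dict.getD_modify, PySem.Dict.getD_modify, PySem.Dict.getD_modify, hg, hg, hg]
    rcases eq_or_ne x c with hxc | hxc
    · subst hxc
      by_cases hxa : x = a
      · subst hxa
        simp [List.count_append]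
      · have h2 := Ne.symm hxa
        simp [List.count_append, hxa, h2]
    · have h1 := Ne.symm hxc
      by_cases hxa : x = a
      · subst hxa
        simp [List.count_append, hxc, h1]
      · have h2 := Ne.symm hxa
        simp [List.count_append, hxc, hxa, h1, h2]
  have hc2 : ∀ x, ((d.modify a 0 (· - 1)).modify c 0 (· + 1)).contains x = true ↔ (x = c ∨ x ∈ a :: m) := by
    intro x
    rw [PySem.Dict.contains_modify, PySem.Dict.contains_modify]
    simp [hc]
  have hnd1 : (d.modify a 0 (· - 1)).keys.Nodup := by
    rw [PySem.Dict.keys_modify]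
    exact PySem.Dict.nodup_keys_insert _ _ _ hnd
  have hnd2 : ((d.modify a 0 (· - 1)).modify c 0 (· + 1)).keys.Nodup := by
    rw [PySem.Dict.keys_modify]
    exact PySem.Dict.nodup_keys_insert _ _ _ hnd1
  unfold pvUpd
  split
  case isTrue hz =>
    have ha : a ∉ m ++ [c] := by
      rw [hg2 a] at hz
      have : (m ++ [c]).count a = 0 := by exact_mod_cast hz
      exact (List.count_eq_zero).1 this
    refine ⟨?_, fun x => ?_, fun x => ?_⟩
    · rw [pvErase_keys]; exact hnd2.filter _
    · rw [pvErase_getD]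
      split
      case isTrue hxa =>
        subst hxa
        have : (m ++ [c]).count x = 0 := (List.count_eq_zero).2 ha
        simp [this]
      case isFalse hxa => exact hg2 x
    · rw [pvErase_contains, hc2]
      constructor
      · rintro ⟨hxa, hcc | hmem⟩
        · subst hcc; simp
        · rcases List.mem_cons.1 hmem with h | h
          · exact absurd h hxa
          · simp [h]
      · intro hx
        rcases List.mem_append.1 hx with h | h
        · exact ⟨fun e => ha (e ▸ hx), Or.inr (List.mem_cons_of_mem _ h)⟩
        · simp only [List.mem_singleton] at h
          exact ⟨fun e => ha (e ▸ hx), Or.inl h⟩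
  case isFalse hz =>
    have ha : a ∈ m ++ [c] := by
      rw [hg2 a] at hz
      have : (m ++ [c]).count a ≠ 0 := by exact_mod_cast hz
      exact List.count_pos_iff.1 (Nat.pos_of_ne_zero this)
    refine ⟨hnd2, hg2, fun x => ?_⟩
    rw [hc2]
    constructor
    · rintro (hcc | hmem)
      · subst hcc; simp
      · rcases List.mem_cons.1 hmem with h | h
        · exact h ▸ ha
        · exact List.mem_append_left _ h
    · intro hx
      rcases List.mem_append.1 hx with h | h
      · exact Or.inr (List.mem_cons_of_mem _ h)
      · simp only [List.mem_singleton] at h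
        exact Or.inl h

lemma pvLoopA (s : List Char) (K : Int) (k : Nat) (hK : K = (k : Int)) (hk : 1 ≤ k)
    (rest : List Char) :
    ∀ (j : Nat) (d : PySem.Dict Char Int) (acc : List String),
      rest = s.drop (k + j) →
      pvInv d (pvWin s k j) →
      ((PySem.List.enumerate rest (K + (j : Int))).foldl (pvStepA s K) (d, acc)).2
        = acc ++ ((List.range' (j + 1) rest.length).filter (pvP s K k)).map (pvF s k) := by
  induction rest with
  | nil => intro j d acc _ _; simp [PySem.List.enumerate_nil]
  | cons x rest' ih =>
    intro j d acc hrest hinv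
    have hjn : k + j < s.length := by
      have := congrArg List.length hrest
      simp [List.length_drop] at this
      omega
    have hj : j < s.length := by omega
    rw [List.drop_eq_getElem_cons hjn] at hrest
    have hx : x = s[k + j]'hjn := (List.cons.injEq _ _ _ _ ▸ hrest).1
    have hrest' : rest' = s.drop (k + j + 1) := (List.cons.injEq _ _ _ _ ▸ hrest).2
    have hrest'' : rest' = s.drop (k + (j + 1)) := by
      rw [show k + (j + 1) = k + j + 1 by omega]
      exact hrest'
    have hwin : pvWin s k j = (s[j]'hj) :: (s.drop (j + 1)).take (k - 1) := by
      unfold pvWin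
      rw [List.drop_eq_getElem_cons hj]
      conv_lhs => rw [show k = (k - 1) + 1 by omega]
      rw [List.take_succ_cons]
    have hwin' : pvWin s k (j + 1) = (s.drop (j + 1)).take (k - 1) ++ [s[k + j]'hjn] := by
      unfold pvWin
      conv_lhs => rw [show k = (k - 1) + 1 by omega]
      rw [List.take_add_one]
      congr 1
      rw [List.getElem?_drop, show j + 1 + (k - 1) = k + j by omega,
        List.getElem?_eq_getElem hjn]
      rfl
    have hinv2 : pvInv (pvUpd d (s[j]'hj) x) (pvWin s k (j + 1)) := by
      rw [hwin', ← hx]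
      exact pvStep_inv x (hwin ▸ hinv)
    have hstep : pvStepA s K (d, acc) (K + (j : Int), x)
        = (pvUpd d (s[j]'hj) x,
           if PySem.Set.len (PySem.Set.ofList (pvWin s k (j + 1))) = K - 1 then
             acc ++ [pvF s k (j + 1)] else acc) := by
      unfold pvStepA
      simp only
      rw [show K + (j : Int) - K = ((j : Nat) : Int) by omega]
      rw [PySem.List.pyGetD_natCast, List.getD_eq_getElem s ' ' hj]
      rw [show ((j : Nat) : Int) + 1 = (((j + 1 : Nat)) : Int) by push_cast; ring]
      rw [show K + (j : Int) + 1 = (((j + 1 : Nat)) : Int) + ((k : Nat) : Int) by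
        rw [hK]; push_cast; omega]
      rw [PySem.List.slice_natCast_add]
      rw [pvInv_size hinv2]
      rfl
    rw [PySem.List.enumerate_cons, List.foldl_cons, hstep,
      show K + (j : Int) + 1 = K + ((j + 1 : Nat) : Int) by push_cast; omega]
    rw [ih (j + 1) (pvUpd d (s[j]'hj) x) _ hrest'' hinv2]
    rw [List.length_cons, List.range'_succ, List.filter_cons]
    by_cases hp : PySem.Set.len (PySem.Set.ofList (pvWin s k (j + 1))) = K - 1
    · simp only [PySem.Set.len] at hp
      simp [pvP, PySem.Set.len, hp, List.append_assoc, pvF]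
    · simp only [PySem.Set.len] at hp
      simp [pvP, PySem.Set.len, hp]

-- B's fold emits exactly the windows passing its test, in order
lemma pvBfold (s : List Char) (K : Int) (l : List Int) (acc : List String) :
    l.foldl (fun ans i =>
        let w := PySem.List.slice s (some i) (some (i + K))
        if PySem.Set.len (PySem.Set.ofList w) = K - 1 then ans ++ [String.ofList w] else ans) acc
      = acc ++ (l.filter (fun i => decide (PySem.Set.len (PySem.Set.ofList
            (PySem.List.slice s (some i) (some (i + K)))) = K - 1))).map
          (fun i => String.ofList (PySem.List.slice s (some i) (some (i + K)))) := by
  have hfun : (fun (ans : List String) (i : Int) =>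
        let w := PySem.List.slice s (some i) (some (i + K))
        if PySem.Set.len (PySem.Set.ofList w) = K - 1 then ans ++ [String.ofList w] else ans)
      = (fun ans i =>
        if (fun i => decide (PySem.Set.len (PySem.Set.ofList
              (PySem.List.slice s (some i) (some (i + K)))) = K - 1)) i = true
        then ans ++ [(fun i => String.ofList (PySem.List.slice s (some i) (some (i + K)))) i]
        else ans) := by
    funext ans i
    simp [decide_eq_true_eq]
  rw [hfun, PySem.List.foldl_append_if]

-- ===== VERDICT (by name: the statement is the Claim_ definition above) =====
theorem find_K1_DistinctStr_spec : Claim_equal_find_K1_DistinctStr := by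
  intro str K _
  unfold Spec_find_K1_DistinctStr find_K1_DistinctStr find_K1_DistinctStr_alt
  by_cases hg : K ≤ 1 ∨ K > PySem.List.len str.toList
  · simp only [if_pos hg]
  · simp only [if_neg hg]
    push_neg at hg
    obtain ⟨h1, h2⟩ := hg
    rw [PySem.List.len_eq] at h2
    obtain ⟨k, hK⟩ : ∃ k : Nat, K = (k : Int) := ⟨K.toNat, (Int.toNat_of_nonneg (by omega)).symm⟩
    have hk1 : 1 ≤ k := by omega
    have hkn : k ≤ str.toList.length := by omega
    -- A side
    rw [PySem.List.slice_from str.toList (by omega : (0:Int) ≤ K),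
      PySem.List.slice_to str.toList (by omega : (0:Int) ≤ K)]
    rw [show K.toNat = k by omega]
    rw [← PySem.Dict.counter_eq_foldl]
    rw [pvInv_size (pvInv_counter (str.toList.take k))]
    have hloop := pvLoopA str.toList K k hK hk1 (str.toList.drop k) 0
      (PySem.Dict.counter (str.toList.take k))
      (if PySem.Set.len (PySem.Set.ofList (str.toList.take k)) = K - 1
        then [String.ofList (str.toList.take k)] else [])
      (by rw [Nat.add_zero]) (by simpa [pvWin] using pvInv_counter (str.toList.take k))
    simp only [Nat.cast_zero, add_zero, Nat.zero_add] at hloop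
    rw [hloop]
    simp only [List.length_drop]
    -- B side
    rw [PySem.List.len_eq,
      show ((str.toList.length : Int) - K + 1) = ((str.toList.length - k + 1 : Nat) : Int) by
        push_cast; omega,
      PySem.List.pyRange_zero_natCast, pvBfold, List.nil_append, List.filter_map, List.map_map]
    have hpcomp : ∀ j : Nat,
        ((fun i : Int => decide (PySem.Set.len (PySem.Set.ofList
            (PySem.List.slice str.toList (some i) (some (i + K)))) = K - 1)) ∘ (fun j : Nat => (j : Int))) j
          = pvP str.toList K k j := by
      intro j
      have hj : ((j : Nat) : Int) + K = ((j : Nat) : Int) + ((k : Nat) : Int) := by rw [hK]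
      simp only [Function.comp]
      rw [hj, PySem.List.slice_natCast_add]
      rfl
    have hfcomp : ∀ j : Nat,
        ((fun i : Int => String.ofList (PySem.List.slice str.toList (some i) (some (i + K)))) ∘ (fun j : Nat => (j : Int))) j
          = pvF str.toList k j := by
      intro j
      have hj : ((j : Nat) : Int) + K = ((j : Nat) : Int) + ((k : Nat) : Int) := by rw [hK]
      simp only [Function.comp]
      rw [hj, PySem.List.slice_natCast_add]
      rfl
    rw [List.filter_congr (fun a _ => hpcomp a), List.map_congr_left (fun a _ => hfcomp a)]
    rw [List.range_eq_range', List.range'_succ, List.filter_cons]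
    simp only [Nat.zero_add]
    by_cases hp0 : PySem.Set.len (PySem.Set.ofList (str.toList.take k)) = K - 1
    · rw [if_pos hp0, if_pos (show pvP str.toList K k 0 = true by
        simpa [pvP, pvWin, PySem.Set.len] using hp0)]
      simp [pvF, pvWin]
    · rw [if_neg hp0, if_neg (show ¬ pvP str.toList K k 0 = true by
        simpa [pvP, pvWin, PySem.Set.len] using hp0)]
      simp
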